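-- pv_equiv track=rewrite | github.com/fenghaitao/mcp-crawl4ai-rag | core/user_manual_chunker/markdown_parser.py | _get_preceding_text_by_line
-- ===== SOURCE A (Python) =====
-- from typing import List, Optional, Tuple
--
-- def _get_preceding_text_by_line(
--
--     lines: List[str],
--     code_line_num: int
-- ) -> Optional[str]:
--     """
--     Get the paragraph immediately preceding a code block by line number.
--
--     Args:
--         lines: Lines of the document
--         code_line_num: Line number where code starts (0-indexed)
--
--     Returns:
--         Preceding paragraph text or None
--     """
--     if code_line_num <= 0:
--         return None
--
--     # Look backwards for non-empty lines
--     preceding_lines = []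
--     for i in range(code_line_num - 1, -1, -1):
--         line = lines[i].strip()
--
--         # Stop at empty line or heading
--         if not line or line.startswith('#'):
--             break
--
--         # Stop at another code fence
--         if line.startswith('```'):
--             break
--
--         preceding_lines.insert(0, lines[i])
--
--     if preceding_lines:
--         return '\n'.join(preceding_lines).strip()
--
--     return None
-- ===== SOURCE B (Python) =====
-- from typing import List, Optional
--
--
-- def _get_preceding_text_by_line(
--     lines: List[str],
--     code_line_num: int
-- ) -> Optional[str]:
--     """Forward pass: maintain the start index of the paragraph block that
--     ends at the code fence, then slice it out in one go."""
--     if code_line_num <= 0: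
--         return None
--
--     start = 0
--     for i in range(code_line_num):
--         s = lines[i].strip()
--         # any blocker (empty line, heading, code fence) resets the paragraph start
--         if not s or s.startswith('#') or s.startswith('```'):
--             start = i + 1
--
--     block = lines[start:code_line_num]
--     if not block:
--         return None
--     return '\n'.join(block).strip()
-- ===== Notes on version B (the rewrite author's own statement) =====
-- stated objective: faster
-- what changed: A collects the preceding lines with an early-terminating backward scan that prepends via list.insert(0, ...) (O(k) per step, quadratic on long paragraphs); B does one forward pass maintaining a reset boundary index and takes a single slice lines[start:code_line_num].
import Mathlib
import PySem

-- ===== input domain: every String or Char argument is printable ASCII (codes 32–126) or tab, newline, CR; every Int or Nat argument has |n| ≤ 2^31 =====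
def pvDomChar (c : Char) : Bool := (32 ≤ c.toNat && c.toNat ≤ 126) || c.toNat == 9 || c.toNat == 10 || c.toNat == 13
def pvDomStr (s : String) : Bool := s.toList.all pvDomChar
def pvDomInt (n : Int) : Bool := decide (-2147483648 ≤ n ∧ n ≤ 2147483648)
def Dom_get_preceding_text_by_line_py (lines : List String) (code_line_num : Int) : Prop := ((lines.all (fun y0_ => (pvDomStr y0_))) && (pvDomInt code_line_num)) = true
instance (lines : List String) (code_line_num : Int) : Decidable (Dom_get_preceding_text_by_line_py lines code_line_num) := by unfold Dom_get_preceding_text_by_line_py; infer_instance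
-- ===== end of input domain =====

-- B replaces A's early-terminating backward collection by a full forward pass that
-- maintains a reset boundary index and takes one slice, avoiding A's repeated insert(0, ...) (measured faster).


-- ===== PORT A =====
-- backward loop `for i in range(code_line_num - 1, -1, -1)` with break, prepending lines[i];
-- Pre_ guarantees every index is in range, so lines.getD i "" is exactly Python's lines[i].
def pvA_loop (lines : List String) : Nat → List String → List String
  | 0, acc => acc
  | i + 1, acc =>
    let line := PySem.Str.strip (lines.getD i "")
    if line = "" || PySem.Str.startswith line "#" then acc
    else if PySem.Str.startswith line "```" then acc
    else pvA_loop lines i (lines.getD i "" :: acc)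

def get_preceding_text_by_line_py (lines : List String) (code_line_num : Int) : Option String :=
  if code_line_num ≤ 0 then none
  else
    let preceding := pvA_loop lines code_line_num.toNat []
    if preceding ≠ [] then some (PySem.Str.strip (PySem.Str.join "\n" preceding))
    else none

-- ===== PORT B =====
def get_preceding_text_by_line_py_alt (lines : List String) (code_line_num : Int) : Option String :=
  if code_line_num ≤ 0 then none
  else
    let n := code_line_num.toNat
    let start := (List.range n).foldl (fun st i =>
      let s := PySem.Str.strip (lines.getD i "")
      if s = "" || PySem.Str.startswith s "#" || PySem.Str.startswith s "```" then i + 1 else st) 0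
    -- lines[start:code_line_num]: exact since 0 ≤ start and 0 < code_line_num here
    let block := (lines.take n).drop start
    if block = [] then none
    else some (PySem.Str.strip (PySem.Str.join "\n" block))

-- ===== PRECONDITION & SPEC =====
-- Pre_ excludes exactly the inputs where Python A raises IndexError: a positive
-- code_line_num larger than len(lines) makes lines[i] go out of range.
def Pre_get_preceding_text_by_line_py (lines : List String) (code_line_num : Int) : Prop :=
  code_line_num ≤ 0 ∨ code_line_num ≤ (lines.length : Int)
instance (lines : List String) (code_line_num : Int) : Decidable (Pre_get_preceding_text_by_line_py lines code_line_num) := by unfold Pre_get_preceding_text_by_line_py; infer_instance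

def pvWitness_get_preceding_text_by_line_py : List String × Int := (["a line", "b line"], 2)

def Spec_get_preceding_text_by_line_py (lines : List String) (code_line_num : Int) (out : Option String) : Prop := out = get_preceding_text_by_line_py_alt lines code_line_num
instance (lines : List String) (code_line_num : Int) (out : Option String) : Decidable (Spec_get_preceding_text_by_line_py lines code_line_num out) := by unfold Spec_get_preceding_text_by_line_py; infer_instance

-- ===== CLAIM (what is proved, stated in full; the proofs are below) =====
def Claim_equal_get_preceding_text_by_line_py : Prop := ∀ (lines : List String) (code_line_num : Int), Dom_get_preceding_text_by_line_py lines code_line_num → Pre_get_preceding_text_by_line_py lines code_line_num → Spec_get_preceding_text_by_line_py lines code_line_num (get_preceding_text_by_line_py lines code_line_num)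

-- ===== LEMMAS AND PROOFS =====

-- the blocker test shared by the analysis
def pvStop (lines : List String) (i : Nat) : Bool :=
  let s := PySem.Str.strip (lines.getD i "")
  s = "" || PySem.Str.startswith s "#" || PySem.Str.startswith s "```"

-- the boundary index B's forward fold computes
def pvBnd (lines : List String) (n : Nat) : Nat :=
  (List.range n).foldl (fun st i =>
    let s := PySem.Str.strip (lines.getD i "")
    if s = "" || PySem.Str.startswith s "#" || PySem.Str.startswith s "```" then i + 1 else st) 0

theorem pvBnd_succ (lines : List String) (n : Nat) :
    pvBnd lines (n + 1) = if pvStop lines n then n + 1 else pvBnd lines n := by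
  simp [pvBnd, pvStop, List.range_succ]

theorem pvBnd_le (lines : List String) (n : Nat) : pvBnd lines n ≤ n := by
  induction n with
  | zero => simp [pvBnd]
  | succ n ih =>
    rw [pvBnd_succ]
    split <;> omega

theorem pvA_loop_eq (lines : List String) (n : Nat) (h : n ≤ lines.length) (acc : List String) :
    pvA_loop lines n acc = (lines.take n).drop (pvBnd lines n) ++ acc := by
  induction n generalizing acc with
  | zero => simp [pvA_loop, pvBnd]
  | succ n ih =>
    rw [pvBnd_succ]
    have hn : n < lines.length := by omega
    have htake : lines.take (n + 1) = lines.take n ++ [lines[n]] := by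
      rw [List.take_add_one, List.getElem?_eq_getElem hn]; rfl
    by_cases hs : pvStop lines n = true
    · -- blocker at n: A breaks immediately, B's slice starts past n
      have hs2 := hs
      simp only [pvStop] at hs2
      have hA : pvA_loop lines (n + 1) acc = acc := by
        simp only [pvA_loop]
        by_cases h12 : (decide (PySem.Str.strip (lines.getD n "") = "") ||
            PySem.Str.startswith (PySem.Str.strip (lines.getD n "")) "#") = true
        · rw [if_pos h12]
        · rw [if_neg h12]
          have h3 : PySem.Str.startswith (PySem.Str.strip (lines.getD n "")) "```" = true := by
            rcases Bool.or_eq_true_iff.mp hs2 with hx | hx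
            · exact absurd hx h12
            · exact hx
          rw [if_pos h3]
      rw [hA, if_pos hs, List.drop_eq_nil_of_le (by simp), List.nil_append]
    · -- no blocker at n: A prepends lines[n] and recurses, B keeps the old boundary
      have hs' : pvStop lines n = false := Bool.eq_false_iff.mpr hs
      simp only [pvStop, Bool.or_eq_true_iff, decide_eq_true_eq, not_or,
        Bool.not_eq_true] at hs
      obtain ⟨⟨h1, h2⟩, h3⟩ := hs
      have c1 : (decide (PySem.Str.strip (lines.getD n "") = "") ||
          PySem.Str.startswith (PySem.Str.strip (lines.getD n "")) "#") = false := by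
        rw [Bool.or_eq_false_iff]
        exact ⟨decide_eq_false h1, h2⟩
      have hA : pvA_loop lines (n + 1) acc = pvA_loop lines n (lines.getD n "" :: acc) := by
        simp only [pvA_loop]
        rw [c1, h3]
        simp
      rw [hA, ih (by omega), hs', if_neg (by simp)]
      have hlen : (lines.take n).length = n := by
        rw [List.length_take]; omega
      rw [htake, List.drop_append_of_le_length (by rw [hlen]; exact pvBnd_le lines n)]
      simp [List.getD, List.getElem?_eq_getElem hn]

-- ===== VERDICT (by name: the statement is the Claim_ definition above) =====
theorem get_preceding_text_by_line_py_spec : Claim_equal_get_preceding_text_by_line_py := by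
  intro lines c _ hpre
  unfold Spec_get_preceding_text_by_line_py
  unfold get_preceding_text_by_line_py get_preceding_text_by_line_py_alt
  by_cases hc : c ≤ 0
  · rw [if_pos hc, if_pos hc]
  · rw [if_neg hc, if_neg hc]
    have hclen : c.toNat ≤ lines.length := by
      rcases hpre with h | h <;> omega
    have key := pvA_loop_eq lines c.toNat hclen []
    rw [List.append_nil] at key
    simp only [pvBnd] at key
    simp only [key]
    split_ifs <;> tauto
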